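-- pv_equiv track=rewrite | github.com/gereleth/AdventOfCode2022 | src/day12.py | path_to_xydata
-- ===== SOURCE A (Python) =====
-- DELTAS = {
--     # (dy, dx)
--     ">": (0, 1),
--     "v": (1, 0),
--     "<": (0, -1),
--     "^": (-1, 0),
-- }
--
-- def path_to_xydata(path, x0, y0):
--     x, y = x0, y0
--     xx, yy = [x], [y]
--     for char in path:
--         dy, dx = DELTAS[char]
--         x += dx
--         y += dy
--         xx.append(x)
--         yy.append(y)
--     return dict(xdata=xx, ydata=yy)
-- ===== SOURCE B (Python) =====
-- DELTAS = {
--     # (dy, dx)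
--     ">": (0, 1),
--     "v": (1, 0),
--     "<": (0, -1),
--     "^": (-1, 0),
-- }
--
-- def _prefix_sums(start, deltas):
--     total = start
--     out = [start]
--     for d in deltas:
--         total += d
--         out.append(total)
--     return out
--
-- def path_to_xydata(path, x0, y0):
--     dxs = [DELTAS[char][1] for char in path]
--     dys = [DELTAS[char][0] for char in path]
--     return dict(xdata=_prefix_sums(x0, dxs), ydata=_prefix_sums(y0, dys))
-- ===== Notes on version B (the rewrite author's own statement) =====
-- stated objective: alternative
-- what changed: Instead of one fused loop threading x, y and both output lists at once, B first extracts the dx and dy delta sequences from the path and then builds xdata and ydata by two independent prefix-sum scans.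
import Mathlib
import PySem

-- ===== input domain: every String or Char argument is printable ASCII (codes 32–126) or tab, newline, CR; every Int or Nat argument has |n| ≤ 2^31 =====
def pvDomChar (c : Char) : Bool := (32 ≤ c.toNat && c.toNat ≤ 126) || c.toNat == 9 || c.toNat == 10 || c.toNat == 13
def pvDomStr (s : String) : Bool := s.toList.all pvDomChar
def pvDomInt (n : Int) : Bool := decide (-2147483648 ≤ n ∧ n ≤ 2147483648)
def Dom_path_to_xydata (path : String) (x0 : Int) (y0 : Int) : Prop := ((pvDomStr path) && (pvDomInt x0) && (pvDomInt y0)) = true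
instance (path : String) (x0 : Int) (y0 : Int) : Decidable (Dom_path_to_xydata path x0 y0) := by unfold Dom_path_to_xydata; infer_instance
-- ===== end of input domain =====

-- B builds xdata/ydata by two independent prefix-sum scans over extracted deltas instead of A's single fused accumulator loop; same cost (alternative decomposition).

-- ===== PORT A =====
def DELTAS : PySem.Dict Char (Int × Int) :=
  PySem.Dict.ofList [('>', (0, 1)), ('v', (1, 0)), ('<', (0, -1)), ('^', (-1, 0))]

-- the loop body; the `none` (KeyError) case never occurs inside Pre_, getD (0,0) stands in for it
def path_to_xydata (path : String) (x0 : Int) (y0 : Int) : List (String × List Int) :=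
  let st := path.toList.foldl
    (fun (st : Int × Int × List Int × List Int) char =>
      let x := st.1; let y := st.2.1; let xx := st.2.2.1; let yy := st.2.2.2
      let d := DELTAS.getD char (0, 0)
      let x' := x + d.2
      let y' := y + d.1
      (x', y', xx ++ [x'], yy ++ [y']))
    (x0, y0, [x0], [y0])
  [("xdata", st.2.2.1), ("ydata", st.2.2.2)]

-- ===== PORT B =====
def prefixSums (start : Int) (deltas : List Int) : List Int :=
  (deltas.foldl (fun (st : Int × List Int) d => (st.1 + d, st.2 ++ [st.1 + d])) (start, [start])).2

def path_to_xydata_alt (path : String) (x0 : Int) (y0 : Int) : List (String × List Int) :=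
  let dxs := path.toList.map (fun char => (DELTAS.getD char (0, 0)).2)
  let dys := path.toList.map (fun char => (DELTAS.getD char (0, 0)).1)
  [("xdata", prefixSums x0 dxs), ("ydata", prefixSums y0 dys)]

-- ===== PRECONDITION & SPEC =====
-- Pre_ excludes paths containing a character outside DELTAS, on which Python A raises KeyError.
def Pre_path_to_xydata (path : String) (x0 : Int) (y0 : Int) : Prop :=
  path.toList.all (fun c => DELTAS.contains c) = true
instance (path : String) (x0 : Int) (y0 : Int) : Decidable (Pre_path_to_xydata path x0 y0) := by unfold Pre_path_to_xydata; infer_instance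
def pvWitness_path_to_xydata : String × Int × Int := (">v<^", 0, 0)

def Spec_path_to_xydata (path : String) (x0 : Int) (y0 : Int) (out : List (String × List Int)) : Prop := out = path_to_xydata_alt path x0 y0
instance (path : String) (x0 : Int) (y0 : Int) (out : List (String × List Int)) : Decidable (Spec_path_to_xydata path x0 y0 out) := by unfold Spec_path_to_xydata; infer_instance

-- ===== CLAIM (what is proved, stated in full; the proofs are below) =====
def Claim_equal_path_to_xydata : Prop := ∀ (path : String) (x0 : Int) (y0 : Int), Dom_path_to_xydata path x0 y0 → Pre_path_to_xydata path x0 y0 → Spec_path_to_xydata path x0 y0 (path_to_xydata path x0 y0)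

-- ===== LEMMAS AND PROOFS =====

-- A's 4-state fold splits into the two independent 2-state prefix-sum folds of B.
theorem foldA_split (cs : List Char) (x y : Int) (xx yy : List Int) :
    cs.foldl
      (fun (st : Int × Int × List Int × List Int) char =>
        let x := st.1; let y := st.2.1; let xx := st.2.2.1; let yy := st.2.2.2
        let d := DELTAS.getD char (0, 0)
        let x' := x + d.2
        let y' := y + d.1
        (x', y', xx ++ [x'], yy ++ [y']))
      (x, y, xx, yy)
    = (((cs.map (fun c => (DELTAS.getD c (0, 0)).2)).foldl
          (fun (st : Int × List Int) d => (st.1 + d, st.2 ++ [st.1 + d])) (x, xx)).1,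
       ((cs.map (fun c => (DELTAS.getD c (0, 0)).1)).foldl
          (fun (st : Int × List Int) d => (st.1 + d, st.2 ++ [st.1 + d])) (y, yy)).1,
       ((cs.map (fun c => (DELTAS.getD c (0, 0)).2)).foldl
          (fun (st : Int × List Int) d => (st.1 + d, st.2 ++ [st.1 + d])) (x, xx)).2,
       ((cs.map (fun c => (DELTAS.getD c (0, 0)).1)).foldl
          (fun (st : Int × List Int) d => (st.1 + d, st.2 ++ [st.1 + d])) (y, yy)).2) := by
  induction cs generalizing x y xx yy with
  | nil => rfl
  | cons c cs ih => simp only [List.foldl_cons, List.map_cons]; exact ih _ _ _ _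

-- ===== VERDICT (by name: the statement is the Claim_ definition above) =====
theorem path_to_xydata_spec : Claim_equal_path_to_xydata := by
  intro path x0 y0 _ _
  unfold Spec_path_to_xydata path_to_xydata path_to_xydata_alt prefixSums
  simp only [foldA_split]
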